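/- GENERATED by farm/mkstatement.py from design/units.tsv (unit `vorbis_decode_packet_rest.3b`) and the assertions of Vorbis/Spec/PacketRest3.lean — do not edit.
   THE STATEMENT of the proof unit `vorbis_decode_packet_rest.3b`: segment 3b of `vorbis_decode_packet_rest` (37 instructions; entries 0x110f3b;
   exits 0x110fc2; ranges 0x110c6a-0x110c8d + 0x110f3b-0x110fbc)
   takes each of its entry assertions to one of its exit assertions (`Vorbis.Spec.vorbis_decode_packet_rest.Seg3b`), given the contracts of its callees.
   What the names mean: Vorbis/Spec/Basic.lean (the shared hypotheses), Vorbis/Spec/PacketRest3.lean (the assertions). The theorem to prove: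
   `theorem vorbis_decode_packet_rest_3b_ok : Vorbis.Spec.vorbis_decode_packet_rest_3b.Statement`. -/
import Vorbis.Spec.Codebook
import Vorbis.Spec.PacketRest3
namespace Vorbis.Spec.vorbis_decode_packet_rest_3b
open X86 X86.User Asan

/-- The statement of unit `vorbis_decode_packet_rest.3b`. -/
def Statement : Prop :=
  ∀ (Lay : Layout) (_hLay : Lay.hi = 0x1000000) (μ : Microarch) (_hμ : UserX.MicroOK μ) (u₀ : State)
    (_hcode : HasCodeNat Lay u₀ Vorbis.L.vorbis_decode_packet_rest.entry Vorbis.Code.code_vorbis_decode_packet_rest.nat Vorbis.L.vorbis_decode_packet_rest.size)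
    (_h_codebook_decode_scalar_raw : ∀ (others : List Obj) (frames : List (Nat × FrameLayout)) (Blk : Block → Prop) (len : Nat), Calls Lay μ Vorbis.WayInv (Vorbis.conv u₀) Vorbis.L.codebook_decode_scalar_raw.entry (Vorbis.Spec.codebook_decode_scalar_raw.spec others frames Blk len))
    (_h_asan_load1_noabort : Asan.SmallCheck Lay μ Vorbis.WayInv (Vorbis.CodeOK u₀) [.rax, .rdx] 1 Vorbis.L.__asan_load1_noabort.entry)
    (_h_asan_load8_noabort : Asan.SmallCheck Lay μ Vorbis.WayInv (Vorbis.CodeOK u₀) [.rax, .rcx, .rdx] 8 Vorbis.L.__asan_load8_noabort.entry)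
    (_h_asan_load4_noabort : Asan.SmallCheck Lay μ Vorbis.WayInv (Vorbis.CodeOK u₀) [.rax, .rcx, .rdx] 4 Vorbis.L.__asan_load4_noabort.entry)
    (_h_asan_load2_noabort : Asan.SmallCheck Lay μ Vorbis.WayInv (Vorbis.CodeOK u₀) [.rax, .rcx, .rdx] 2 Vorbis.L.__asan_load2_noabort.entry),
    Vorbis.Spec.vorbis_decode_packet_rest.Seg3b Lay μ u₀

end Vorbis.Spec.vorbis_decode_packet_rest_3b
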